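-- pv_equiv track=rewrite | github.com/Mugamta/Boostcamp_AITech5_CV11 | 7.13/이채원_프로그래머스_파일명_정렬.py | solution
-- ===== SOURCE A (Python) =====
-- def solution(files):
--     words = []
--     for f in files :
--
--         head = ''
--         number = ''
--         tail = ''
--
--         for i in range(len(f)) :
--             if f[i].isdigit() :
--                 head = f[:i]
--                 number = f[i:]
--                 for j in range(len(number)) :
--                     if not number[j].isdigit() :
--                         tail = number[j:]
--                         number = number[:j]
--                         break
--                 break
--         words.append([head, number, tail])
--
--
--     words.sort(key = lambda x : (x[0].lower(),int(x[1])) )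
--     answer = list(''.join(x) for x in words)
--     return answer
-- ===== SOURCE B (Python) =====
-- def solution(files):
--     # Group the filenames into buckets keyed by (head.lower(), numeric value),
--     # then emit the buckets in ascending key order. Correct because a stable
--     # sort by key is exactly the concatenation, over the sorted distinct keys,
--     # of the input-order bucket of each key. No per-item sort and no re-join.
--     groups = {}
--     for f in files:
--         i = 0
--         while i < len(f) and not f[i].isdigit():
--             i += 1
--         j = i
--         while j < len(f) and f[j].isdigit():
--             j += 1
--         k = (f[:i].lower(), int(f[i:j]))
--         if k in groups:
--             groups[k].append(f)
--         else:
--             groups[k] = [f]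
--     answer = []
--     for k in sorted(groups):
--         answer.extend(groups[k])
--     return answer
-- ===== Notes on version B (the rewrite author's own statement) =====
-- stated objective: alternative
-- what changed: B replaces A's decorate-sort-join (split every name into a [head,number,tail] triple, stably sort all n triples, re-join) with a group-by: a dict built in one pass maps each (head.lower(), int(number)) key to its bucket of names in input order, only the distinct keys are sorted, and the buckets are concatenated; correct because a stable sort equals the concatenation of input-order buckets over ascending keys.
import Mathlib
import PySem

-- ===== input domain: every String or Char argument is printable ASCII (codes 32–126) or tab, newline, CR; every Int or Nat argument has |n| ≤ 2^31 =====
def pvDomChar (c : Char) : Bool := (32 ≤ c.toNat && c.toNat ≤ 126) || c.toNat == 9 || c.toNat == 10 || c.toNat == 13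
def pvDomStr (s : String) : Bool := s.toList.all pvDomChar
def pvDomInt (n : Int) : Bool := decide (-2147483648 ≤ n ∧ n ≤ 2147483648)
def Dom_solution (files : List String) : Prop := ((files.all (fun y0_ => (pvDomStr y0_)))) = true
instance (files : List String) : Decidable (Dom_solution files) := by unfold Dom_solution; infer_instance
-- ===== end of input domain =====

-- B groups the filenames into a dict keyed by (head.lower(), int(number)) built in one pass,
-- sorts only the distinct keys and concatenates the input-order buckets, instead of A's
-- split-into-[head,number,tail]-triples, stable sort of all triples, and re-join (objective: alternative).


-- ===== PORT A =====
-- inner loop: for j in range(len(number)): if not number[j].isdigit(): tail = number[j:]; number = number[:j]; break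
def aInner (num : List Char) (j : Nat) : List Char × List Char :=
  if h : j < num.length then
    if PySem.Chars.isdigit num[j] then aInner num (j + 1)
    else (num.take j, num.drop j)
  else (num, [])
termination_by num.length - j

-- outer loop: for i in range(len(f)): if f[i].isdigit(): head = f[:i]; number = f[i:]; <inner loop>; break
def aOuter (cs : List Char) (i : Nat) : List Char × List Char × List Char :=
  if h : i < cs.length then
    if PySem.Chars.isdigit cs[i] then
      let p := aInner (cs.drop i) 0
      (cs.take i, p.1, p.2)
    else aOuter cs (i + 1)
  else ([], [], [])
termination_by cs.length - i

-- build words, words.sort(key=lambda x: (x[0].lower(), int(x[1]))), join; int() is ofChars?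
-- (some _ under Pre_solution, where number is a nonempty digit string; the getD 0 default is never reached there)
def solution (files : List String) : List String :=
  let words := files.foldl (fun acc f => acc ++ [aOuter f.toList 0]) []
  let sortedW := PySem.List.sorted2 words
    (fun x => String.ofList (PySem.Chars.lower x.1))
    (fun x => (PySem.Int.ofChars? x.2.1).getD 0)
  sortedW.map (fun x => String.ofList (x.1 ++ x.2.1 ++ x.2.2))

-- ===== PORT B =====
-- while i < len(f) and not f[i].isdigit(): i += 1
def bSkip (cs : List Char) (i : Nat) : Nat :=
  if h : i < cs.length then
    if PySem.Chars.isdigit cs[i] then i else bSkip cs (i + 1)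
  else i
termination_by cs.length - i

-- while j < len(f) and f[j].isdigit(): j += 1
def bRun (cs : List Char) (j : Nat) : Nat :=
  if h : j < cs.length then
    if PySem.Chars.isdigit cs[j] then bRun cs (j + 1) else j
  else j
termination_by cs.length - j

-- k = (f[:i].lower(), int(f[i:j])); the slices (0 ≤ i ≤ j) are take/drop; int() is ofChars? as in port A
def bKey (f : String) : String × Int :=
  let cs := f.toList
  let i := bSkip cs 0
  let j := bRun cs i
  (String.ofList (PySem.Chars.lower (cs.take i)), (PySem.Int.ofChars? ((cs.drop i).take (j - i))).getD 0)

-- groups = {}; for f in files: k = …; if k in groups: groups[k].append(f) else: groups[k] = [f]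
def bGroups (files : List String) : PySem.Dict (String × Int) (List String) :=
  files.foldl (fun d f =>
    let k := bKey f
    if d.contains k then d.insert k (d.getD k [] ++ [f]) else d.insert k [f])
    PySem.Dict.empty

-- answer = []; for k in sorted(groups): answer.extend(groups[k])   (sorted tuple keys = sorted2 fst snd)
def solution_alt (files : List String) : List String :=
  let groups := bGroups files
  (PySem.List.sorted2 groups.keys Prod.fst Prod.snd).foldl (fun acc k => acc ++ groups.getD k []) []

-- ===== PRECONDITION & SPEC =====
-- Pre_ excludes files containing no decimal digit: on those A raises ValueError from int('') (and B does too).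
def Pre_solution (files : List String) : Prop :=
  ∀ f ∈ files, f.toList.any PySem.Chars.isdigit = true
instance (files : List String) : Decidable (Pre_solution files) := by unfold Pre_solution; infer_instance
def pvWitness_solution : List String := ["img12.png", "IMG10 x", "img2", "F-5", "f-050.jpg"]

def Spec_solution (files : List String) (out : List String) : Prop := out = solution_alt files
instance (files : List String) (out : List String) : Decidable (Spec_solution files out) := by unfold Spec_solution; infer_instance

-- ===== CLAIM (what is proved, stated in full; the proofs are below) =====
def Claim_equal_solution : Prop := ∀ (files : List String), Dom_solution files → Pre_solution files → Spec_solution files (solution files)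

-- ===== LEMMAS AND PROOFS =====

-- ---- A-side: the parse produces (take i, take (j-i) ∘ drop i, drop (j-i) ∘ drop i) ----

theorem inner_eq (num : List Char) (j : Nat) :
    aInner num j = (num.take (bRun num j), num.drop (bRun num j)) := by
  fun_induction aInner num j with
  | case1 j h hd ih => rw [bRun]; simp [h, hd]; exact ih
  | case2 j h hd => rw [bRun]; simp [h, hd]
  | case3 j h => rw [bRun]; simp [h]; omega

theorem bRun_drop (cs : List Char) (i j : Nat) :
    bRun cs (i + j) = i + bRun (cs.drop i) j := by
  fun_induction bRun (cs.drop i) j with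
  | case1 j h hd ih =>
      rw [bRun]; simp at h
      have hg : cs[i+j]'(by omega) = (cs.drop i)[j] := by simp
      rw [dif_pos (show i + j < cs.length by omega)]
      rw [hg] at *
      rw [if_pos hd, show i + j + 1 = i + (j + 1) by omega, ih]
  | case2 j h hd =>
      rw [bRun]; simp at h
      have hg : cs[i+j]'(by omega) = (cs.drop i)[j] := by simp
      rw [dif_pos (show i + j < cs.length by omega), hg, if_neg hd]
  | case3 j h =>
      rw [bRun]; simp at h
      by_cases hij : i + j < cs.length
      · omega
      · simp [hij]

theorem outer_eq (cs : List Char) (i : Nat)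
    (hx : ∃ k, i ≤ k ∧ ∃ hk : k < cs.length, PySem.Chars.isdigit cs[k]) :
    aOuter cs i = (cs.take (bSkip cs i),
       (cs.drop (bSkip cs i)).take (bRun cs (bSkip cs i) - bSkip cs i),
       (cs.drop (bSkip cs i)).drop (bRun cs (bSkip cs i) - bSkip cs i)) := by
  fun_induction aOuter cs i with
  | case1 i h hd =>
      rw [bSkip, dif_pos h, if_pos hd]
      have hr : bRun cs i = i + bRun (cs.drop i) 0 := by simpa using bRun_drop cs i 0
      show ((cs.take i, (aInner (cs.drop i) 0).1, (aInner (cs.drop i) 0).2) : List Char × List Char × List Char) = _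
      simp [inner_eq, hr]
  | case2 i h hd ih =>
      rw [bSkip, dif_pos h, if_neg hd]
      apply ih
      obtain ⟨k, hik, hk, hdk⟩ := hx
      have : k ≠ i := by rintro rfl; exact hd hdk
      exact ⟨k, by omega, hk, hdk⟩
  | case3 i h =>
      exfalso; obtain ⟨k, hik, hk, _⟩ := hx; omega

theorem hasDigit_idx (cs : List Char) (h : cs.any PySem.Chars.isdigit = true) :
    ∃ k, 0 ≤ k ∧ ∃ hk : k < cs.length, PySem.Chars.isdigit cs[k] := by
  obtain ⟨x, hm, hp⟩ := List.any_eq_true.mp h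
  obtain ⟨k, hk, hke⟩ := List.mem_iff_getElem.mp hm
  exact ⟨k, Nat.zero_le _, hk, by rw [hke]; exact hp⟩

theorem parse_struct (f : String) (hf : f.toList.any PySem.Chars.isdigit = true) :
    aOuter f.toList 0 = (f.toList.take (bSkip f.toList 0),
      (f.toList.drop (bSkip f.toList 0)).take (bRun f.toList (bSkip f.toList 0) - bSkip f.toList 0),
      (f.toList.drop (bSkip f.toList 0)).drop (bRun f.toList (bSkip f.toList 0) - bSkip f.toList 0)) :=
  outer_eq f.toList 0 (hasDigit_idx _ hf)

theorem key1_eq (f : String) (hf : f.toList.any PySem.Chars.isdigit = true) :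
    String.ofList (PySem.Chars.lower (aOuter f.toList 0).1) = (bKey f).1 := by
  rw [parse_struct f hf]; rfl

theorem key2_eq (f : String) (hf : f.toList.any PySem.Chars.isdigit = true) :
    (PySem.Int.ofChars? (aOuter f.toList 0).2.1).getD 0 = (bKey f).2 := by
  rw [parse_struct f hf]; rfl

theorem join_eq (f : String) (hf : f.toList.any PySem.Chars.isdigit = true) :
    String.ofList ((aOuter f.toList 0).1 ++ (aOuter f.toList 0).2.1 ++ (aOuter f.toList 0).2.2) = f := by
  rw [parse_struct f hf]
  simp [List.append_assoc, List.take_append_drop]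

-- ---- A-side: sorting the triples is sorting the files by bKey ----

theorem insertBy_map {α β : Type} (g : α → β) (cA : β → β → Bool) (cB : α → α → Bool)
    (P : α → Prop) (hc : ∀ a b, P a → P b → cA (g a) (g b) = cB a b)
    (x : α) (hx : P x) : ∀ (ys : List α), (∀ y ∈ ys, P y) →
    PySem.List.insertBy cA (g x) (ys.map g) = (PySem.List.insertBy cB x ys).map g := by
  intro ys
  induction ys with
  | nil => intro _; simp [PySem.List.insertBy]
  | cons y ys ih =>
      intro hys
      simp only [List.map_cons, PySem.List.insertBy]
      rw [hc x y hx (hys y (by simp))]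
      split_ifs with hb
      · simp
      · simp only [List.map_cons, List.cons.injEq, true_and]
        exact ih (fun z hz => hys z (by simp [hz]))

theorem foldl_insertBy_map {α β : Type} (g : α → β) (cA : β → β → Bool) (cB : α → α → Bool)
    (P : α → Prop) (hc : ∀ a b, P a → P b → cA (g a) (g b) = cB a b) :
    ∀ (xs acc : List α), (∀ x ∈ xs, P x) → (∀ y ∈ acc, P y) →
    (xs.map g).foldl (fun a x => PySem.List.insertBy cA x a) (acc.map g)
      = (xs.foldl (fun a x => PySem.List.insertBy cB x a) acc).map g := by
  intro xs
  induction xs with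
  | nil => intro acc _ _; rfl
  | cons x xs ih =>
      intro acc hxs hacc
      simp only [List.map_cons, List.foldl_cons]
      rw [insertBy_map g cA cB P hc x (hxs x (by simp)) acc hacc]
      exact ih _ (fun z hz => hxs z (by simp [hz]))
        (fun z hz => by
          rcases (PySem.List.mem_insertBy cB x z acc).mp hz with h | h
          · exact h ▸ hxs x (by simp)
          · exact hacc z h)

theorem sorted2_map_key {α β κ₁ κ₂ : Type} [LT κ₁] [DecidableLT κ₁] [LT κ₂] [DecidableLT κ₂]
    (g : α → β) (k1 : β → κ₁) (k2 : β → κ₂) (k1' : α → κ₁) (k2' : α → κ₂) (P : α → Prop)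
    (h1 : ∀ a, P a → k1 (g a) = k1' a) (h2 : ∀ a, P a → k2 (g a) = k2' a)
    (xs : List α) (hxs : ∀ x ∈ xs, P x) :
    PySem.List.sorted2 (xs.map g) k1 k2 = (PySem.List.sorted2 xs k1' k2').map g := by
  exact foldl_insertBy_map g _ _ P
    (fun a b ha hb => by simp only [Bool.false_eq_true, if_false, h1 a ha, h1 b hb, h2 a ha, h2 b hb]) xs [] hxs (by simp)

theorem solutionA_eq_sorted (files : List String)
    (hpre : ∀ f ∈ files, f.toList.any PySem.Chars.isdigit = true) :
    solution files = PySem.List.sorted2 files (fun f => (bKey f).1) (fun f => (bKey f).2) := by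
  unfold solution
  show (List.map (fun x => String.ofList (x.1 ++ x.2.1 ++ x.2.2))
      (PySem.List.sorted2 (files.foldl (fun acc f => acc ++ [aOuter f.toList 0]) [])
        (fun x => String.ofList (PySem.Chars.lower x.1))
        (fun x => (PySem.Int.ofChars? x.2.1).getD 0)))
    = PySem.List.sorted2 files (fun f => (bKey f).1) (fun f => (bKey f).2)
  have hw : files.foldl (fun acc f => acc ++ [aOuter f.toList 0]) []
      = files.map (fun f => aOuter f.toList 0) := by
    simpa using PySem.List.foldl_append_singleton_eq_map (fun f => aOuter f.toList 0) files []
  rw [hw]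
  rw [sorted2_map_key (fun f => aOuter f.toList 0)
        (fun x => String.ofList (PySem.Chars.lower x.1))
        (fun x => (PySem.Int.ofChars? x.2.1).getD 0)
        (fun f => (bKey f).1) (fun f => (bKey f).2)
        (fun f => f.toList.any PySem.Chars.isdigit = true)
        (fun a ha => key1_eq a ha) (fun a ha => key2_eq a ha) files hpre]
  rw [List.map_map]
  conv_rhs => rw [show PySem.List.sorted2 files (fun f => (bKey f).1) (fun f => (bKey f).2)
      = List.map id (PySem.List.sorted2 files (fun f => (bKey f).1) (fun f => (bKey f).2)) from (List.map_id _).symm]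
  apply List.map_congr_left
  intro y hy
  have hyf : y ∈ files :=
    ((PySem.List.sorted2_perm files (fun f => (bKey f).1) (fun f => (bKey f).2) false).mem_iff).mp hy
  simpa using join_eq y (hpre y hyf)

-- ---- key order: the boolean comparator sorted2 uses on (String × Int) keys, and its strict order ----

def ltB (a b : String × Int) : Bool :=
  decide (a.1 < b.1) || (!decide (b.1 < a.1) && decide (a.2 < b.2))

def KLT (a b : String × Int) : Prop := a.1 < b.1 ∨ (a.1 = b.1 ∧ a.2 < b.2)

theorem ltB_iff (a b : String × Int) : ltB a b = true ↔ KLT a b := by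
  unfold ltB KLT
  rcases lt_trichotomy a.1 b.1 with h | h | h
  · simp [h, asymm h]
  · simp [h]
  · simp [h, asymm h]
    exact fun he => absurd h (by rw [he]; exact lt_irrefl _)

theorem ltB_true {a b : String × Int} (h : KLT a b) : ltB a b = true := (ltB_iff a b).mpr h

theorem ltB_false {a b : String × Int} (h : ¬ KLT a b) : ltB a b = false := by
  rw [Bool.eq_false_iff]; intro he; exact h ((ltB_iff a b).mp he)

theorem klt_irrefl (a : String × Int) : ¬ KLT a a := by
  unfold KLT; simp

theorem klt_asymm {a b : String × Int} (h : KLT a b) : ¬ KLT b a := by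
  unfold KLT at *
  rcases h with h | ⟨h1, h2⟩
  · rintro (h' | ⟨h1', _⟩)
    · exact absurd h (asymm h')
    · exact absurd h (h1' ▸ lt_irrefl _)
  · rintro (h' | ⟨_, h2'⟩)
    · exact absurd h' (h1 ▸ lt_irrefl _)
    · exact absurd h2 (asymm h2')

theorem klt_trans {a b c : String × Int} (h1 : KLT a b) (h2 : KLT b c) : KLT a c := by
  unfold KLT at *
  rcases h1 with h1 | ⟨e1, l1⟩ <;> rcases h2 with h2 | ⟨e2, l2⟩
  · exact Or.inl (lt_trans h1 h2)
  · exact Or.inl (e2 ▸ h1)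
  · exact Or.inl (e1 ▸ h2)
  · exact Or.inr ⟨e1.trans e2, lt_trans l1 l2⟩

theorem klt_total {a b : String × Int} (h : a ≠ b) : KLT a b ∨ KLT b a := by
  unfold KLT
  rcases lt_trichotomy a.1 b.1 with h1 | h1 | h1
  · exact Or.inl (Or.inl h1)
  · rcases lt_trichotomy a.2 b.2 with h2 | h2 | h2
    · exact Or.inl (Or.inr ⟨h1, h2⟩)
    · exact absurd (Prod.ext h1 h2) h
    · exact Or.inr (Or.inr ⟨h1.symm, h2⟩)
  · exact Or.inr (Or.inl h1)

-- ---- the grouped form: buckets (input-order filters) concatenated over a key list ----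

def cat (S : List (String × Int)) (xs : List String) : List String :=
  S.flatMap (fun k => xs.filter (fun g => decide (bKey g = k)))

theorem mem_cat {S : List (String × Int)} {xs : List String} {y : String} (h : y ∈ cat S xs) :
    bKey y ∈ S := by
  unfold cat at h
  obtain ⟨k, hk, hy⟩ := List.mem_flatMap.mp h
  obtain ⟨-, hky⟩ := List.mem_filter.mp hy
  exact (of_decide_eq_true hky) ▸ hk

theorem cat_cons (k : String × Int) (S : List (String × Int)) (xs : List String) :
    cat (k :: S) xs = xs.filter (fun g => decide (bKey g = k)) ++ cat S xs := by
  simp [cat]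

theorem filter_append_key (xs : List String) (f : String) (k : String × Int) (h : bKey f = k) :
    (xs ++ [f]).filter (fun g => decide (bKey g = k))
      = xs.filter (fun g => decide (bKey g = k)) ++ [f] := by
  simp [List.filter_append, h]

theorem filter_append_notkey (xs : List String) (f : String) (k : String × Int) (h : bKey f ≠ k) :
    (xs ++ [f]).filter (fun g => decide (bKey g = k))
      = xs.filter (fun g => decide (bKey g = k)) := by
  simp [List.filter_append, h]

theorem cat_append_notkey {S : List (String × Int)} {xs : List String} {f : String}
    (h : bKey f ∉ S) : cat S (xs ++ [f]) = cat S xs := by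
  unfold cat
  apply List.flatMap_congr
  intro k hk
  exact filter_append_notkey xs f k (fun he => h (he ▸ hk))

-- ---- insertBy positioning lemmas ----

theorem insertBy_front {α : Type} (before : α → α → Bool) (x : α) (l : List α)
    (h : ∀ y ∈ l, before x y = true) : PySem.List.insertBy before x l = x :: l := by
  cases l with
  | nil => rfl
  | cons y ys => simp [PySem.List.insertBy, h y (by simp)]

theorem insertBy_append_left {α : Type} (before : α → α → Bool) (x : α) (l1 l2 : List α)
    (h : ∀ y ∈ l1, before x y = false) :
    PySem.List.insertBy before x (l1 ++ l2) = l1 ++ PySem.List.insertBy before x l2 := by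
  induction l1 with
  | nil => rfl
  | cons y ys ih =>
      simp only [List.cons_append, PySem.List.insertBy, h y (by simp)]
      simp only [Bool.false_eq_true, if_false, List.cons.injEq, true_and]
      exact ih (fun z hz => h z (by simp [hz]))

-- ---- the core: inserting f into the grouped form appends f to its bucket ----

theorem insert_cat (S : List (String × Int)) (xs : List String) (f : String)
    (hs : S.Pairwise KLT)
    (hcov : bKey f ∉ S → ∀ x ∈ xs, bKey x ≠ bKey f) :
    PySem.List.insertBy (fun a b => ltB (bKey a) (bKey b)) f (cat S xs)
      = if bKey f ∈ S then cat S (xs ++ [f])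
        else cat (PySem.List.insertBy ltB (bKey f) S) (xs ++ [f]) := by
  induction S generalizing xs with
  | nil =>
      have hxs : xs.filter (fun g => decide (bKey g = bKey f)) = [] := by
        apply List.filter_eq_nil_iff.mpr
        intro x hx
        simpa using hcov (by simp) x hx
      simp only [cat, List.flatMap_nil, List.not_mem_nil, if_neg (by simp : ¬ bKey f ∈ ([] : List (String × Int)))]
      show PySem.List.insertBy _ f [] = cat (PySem.List.insertBy ltB (bKey f) []) (xs ++ [f])
      simp [PySem.List.insertBy, cat, List.filter_append, hxs]
  | cons k S' ih =>
      obtain ⟨hsp, hs'⟩ := List.pairwise_cons.mp hs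
      by_cases heq : bKey f = k
      · -- f's bucket is the first one: skip it, land right after it
        have hmem : bKey f ∈ k :: S' := by simp [heq]
        rw [if_pos hmem, cat_cons k S' xs, cat_cons k S' (xs ++ [f])]
        have hskip : ∀ y ∈ xs.filter (fun g => decide (bKey g = k)),
            (fun a b => ltB (bKey a) (bKey b)) f y = false := by
          intro y hy
          have : bKey y = k := of_decide_eq_true (List.mem_filter.mp hy).2
          exact ltB_false (by rw [this, heq]; exact klt_irrefl k)
        rw [insertBy_append_left _ _ _ _ hskip]
        have hfront : ∀ y ∈ cat S' xs, (fun a b => ltB (bKey a) (bKey b)) f y = true := by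
          intro y hy
          exact ltB_true (heq ▸ hsp (bKey y) (mem_cat hy))
        rw [insertBy_front _ _ _ hfront]
        have hns' : bKey f ∉ S' := fun hm => klt_irrefl k (heq ▸ hsp (bKey f) hm)
        rw [filter_append_key xs f k heq, cat_append_notkey hns']
        simp
      · by_cases hlt : KLT (bKey f) k
        · -- f goes strictly before the first bucket
          have hns : bKey f ∉ k :: S' := by
            intro hm
            rcases List.mem_cons.mp hm with h | h
            · exact heq h
            · exact absurd (hsp (bKey f) h) (klt_asymm hlt)
          rw [if_neg hns]
          have hfront : ∀ y ∈ cat (k :: S') xs, (fun a b => ltB (bKey a) (bKey b)) f y = true := by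
            intro y hy
            rcases List.mem_cons.mp (mem_cat hy) with h | h
            · exact ltB_true (h ▸ hlt)
            · exact ltB_true (klt_trans hlt (hsp (bKey y) h))
          rw [insertBy_front _ _ _ hfront]
          have hins : PySem.List.insertBy ltB (bKey f) (k :: S') = bKey f :: k :: S' := by
            simp [PySem.List.insertBy, ltB_true hlt]
          have hxs : (xs ++ [f]).filter (fun g => decide (bKey g = bKey f)) = [f] := by
            rw [filter_append_key xs f (bKey f) rfl]
            have : xs.filter (fun g => decide (bKey g = bKey f)) = [] := by
              apply List.filter_eq_nil_iff.mpr
              intro x hx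
              simpa using hcov hns x hx
            simp [this]
          rw [hins, cat_cons (bKey f) (k :: S') (xs ++ [f]), hxs, cat_append_notkey hns]
          rfl
        · -- the first bucket comes before f: skip it and recurse
          have hk : KLT k (bKey f) := by
            rcases klt_total (fun he => heq he.symm) with h | h
            · exact h
            · exact absurd h hlt
          have hskip : ∀ y ∈ xs.filter (fun g => decide (bKey g = k)),
              (fun a b => ltB (bKey a) (bKey b)) f y = false := by
            intro y hy
            have : bKey y = k := of_decide_eq_true (List.mem_filter.mp hy).2
            exact ltB_false (this ▸ klt_asymm hk)
          have hcov' : bKey f ∉ S' → ∀ x ∈ xs, bKey x ≠ bKey f := by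
            intro hns'
            exact hcov (by simp [heq, hns'])
          rw [cat_cons k S' xs, insertBy_append_left _ _ _ _ hskip, ih xs hs' hcov']
          by_cases hm : bKey f ∈ S'
          · rw [if_pos hm, if_pos (by simp [hm]), cat_cons k S' (xs ++ [f]),
              filter_append_notkey xs f k heq]
          · rw [if_neg hm, if_neg (by simp [heq, hm])]
            have hins : PySem.List.insertBy ltB (bKey f) (k :: S')
                = k :: PySem.List.insertBy ltB (bKey f) S' := by
              simp [PySem.List.insertBy, ltB_false (klt_asymm hk)]
            rw [hins, cat_cons k (PySem.List.insertBy ltB (bKey f) S') (xs ++ [f]),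
              filter_append_notkey xs f k heq]

-- ---- sortedness of the sorted distinct keys ----

theorem pairwise_insertBy (x : String × Int) (l : List (String × Int))
    (hl : l.Pairwise KLT) (hx : x ∉ l) :
    (PySem.List.insertBy ltB x l).Pairwise KLT := by
  induction l with
  | nil => simp [PySem.List.insertBy]
  | cons y ys ih =>
      obtain ⟨hy, hys⟩ := List.pairwise_cons.mp hl
      by_cases hb : ltB x y = true
      · have hxy : KLT x y := (ltB_iff x y).mp hb
        rw [insertBy_front _ _ _ (fun z hz => by
          rcases List.mem_cons.mp hz with h | h
          · exact h ▸ hb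
          · exact ltB_true (klt_trans hxy (hy z h)))]
        exact List.pairwise_cons.mpr ⟨fun z hz => by
          rcases List.mem_cons.mp hz with h | h
          · exact h ▸ hxy
          · exact klt_trans hxy (hy z h), hl⟩
      · have hstep : PySem.List.insertBy ltB x (y :: ys) = y :: PySem.List.insertBy ltB x ys := by
          simp only [PySem.List.insertBy, hb, Bool.false_eq_true, if_false]
        rw [hstep]
        apply List.pairwise_cons.mpr
        constructor
        · intro z hz
          rcases (PySem.List.mem_insertBy ltB x z ys).mp hz with h | h
          · subst h
            have hne : y ≠ z := fun he => hx (by simp [← he])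
            rcases klt_total (fun he => hne he.symm) with h' | h'
            · exact absurd (ltB_true h') (by simpa using hb)
            · exact h'
          · exact hy z h
        · exact ih hys (fun hm => hx (by simp [hm]))

theorem foldl_ins_pairwise : ∀ (ks acc : List (String × Int)), acc.Pairwise KLT →
    (∀ k ∈ ks, k ∉ acc) → ks.Nodup →
    (ks.foldl (fun a k => PySem.List.insertBy ltB k a) acc).Pairwise KLT := by
  intro ks
  induction ks with
  | nil => intro acc h _ _; exact h
  | cons k ks ih =>
      intro acc hacc hdis hnd
      simp only [List.foldl_cons]
      apply ih
      · exact pairwise_insertBy k acc hacc (hdis k (by simp))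
      · intro k' hk' hm
        rcases (PySem.List.mem_insertBy ltB k k' acc).mp hm with h | h
        · exact (List.nodup_cons.mp hnd).1 (h ▸ hk')
        · exact hdis k' (by simp [hk']) h
      · exact (List.nodup_cons.mp hnd).2

theorem sortedK_foldl (ks : List (String × Int)) :
    PySem.List.sorted2 ks Prod.fst Prod.snd
      = ks.foldl (fun a k => PySem.List.insertBy ltB k a) [] := rfl

theorem sortedF_foldl (files : List String) :
    PySem.List.sorted2 files (fun f => (bKey f).1) (fun f => (bKey f).2)
      = files.foldl (fun a f => PySem.List.insertBy (fun a b => ltB (bKey a) (bKey b)) f a) [] := rfl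

theorem sortedK_pairwise (ks : List (String × Int)) (h : ks.Nodup) :
    (PySem.List.sorted2 ks Prod.fst Prod.snd).Pairwise KLT := by
  rw [sortedK_foldl]
  exact foldl_ins_pairwise ks [] (by simp) (by simp) h

theorem mem_sortedK (ks : List (String × Int)) (k : String × Int) :
    k ∈ PySem.List.sorted2 ks Prod.fst Prod.snd ↔ k ∈ ks :=
  (PySem.List.sorted2_perm ks Prod.fst Prod.snd false).mem_iff

theorem ofList_append_single {α : Type} [BEq α] [LawfulBEq α] (l : List α) (x : α) :
    PySem.Set.ofList (l ++ [x])
      = if x ∈ PySem.Set.ofList l then PySem.Set.ofList l else PySem.Set.ofList l ++ [x] := by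
  simp [PySem.Set.ofList, PySem.Set.add]

-- ---- main: the stable sort by key is the grouped form over the sorted distinct keys ----

theorem sorted_eq_cat (files : List String) :
    PySem.List.sorted2 files (fun f => (bKey f).1) (fun f => (bKey f).2)
      = cat (PySem.List.sorted2 (PySem.Set.ofList (files.map bKey)) Prod.fst Prod.snd) files := by
  induction files using List.reverseRecOn with
  | nil => rfl
  | append_singleton xs f ih =>
      have hL : PySem.List.sorted2 (xs ++ [f]) (fun f => (bKey f).1) (fun f => (bKey f).2)
          = PySem.List.insertBy (fun a b => ltB (bKey a) (bKey b)) f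
              (PySem.List.sorted2 xs (fun f => (bKey f).1) (fun f => (bKey f).2)) := by
        rw [sortedF_foldl, sortedF_foldl, List.foldl_append]
        rfl
      rw [hL, ih]
      have hnd := PySem.Set.nodup_ofList (xs.map bKey)
      have hsp := sortedK_pairwise (PySem.Set.ofList (xs.map bKey)) hnd
      have hmemS : bKey f ∈ PySem.List.sorted2 (PySem.Set.ofList (xs.map bKey)) Prod.fst Prod.snd
          ↔ bKey f ∈ xs.map bKey :=
        (mem_sortedK _ _).trans (PySem.Set.mem_ofList _ _)
      have hcov : bKey f ∉ PySem.List.sorted2 (PySem.Set.ofList (xs.map bKey)) Prod.fst Prod.snd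
          → ∀ x ∈ xs, bKey x ≠ bKey f := by
        intro hn x hx he
        exact hn (hmemS.mpr (List.mem_map.mpr ⟨x, hx, he⟩))
      rw [insert_cat _ _ _ hsp hcov]
      rw [List.map_append, List.map_singleton, ofList_append_single]
      by_cases hm : bKey f ∈ PySem.Set.ofList (xs.map bKey)
      · rw [if_pos hm, if_pos (hmemS.mpr ((PySem.Set.mem_ofList _ _).mp hm))]
      · rw [if_neg hm,
          if_neg (fun hc => hm ((PySem.Set.mem_ofList _ _).mpr (hmemS.mp hc)))]
        congr 1
        rw [sortedK_foldl, sortedK_foldl, List.foldl_append]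
        rfl

-- ---- the dict of buckets: its items are exactly the first-occurrence keys with their filters ----

theorem find_group (K : List (String × Int)) (v : (String × Int) → List String) (k0 : String × Int) :
    (K.map (fun k => (k, v k))).find? (fun p => p.1 == k0)
      = if k0 ∈ K then some (k0, v k0) else none := by
  induction K with
  | nil => simp
  | cons k K' ih =>
      by_cases h : k = k0
      · subst h
        simp [List.find?_cons]
      · simp only [List.map_cons, List.find?_cons]
        have : ((k, v k).1 == k0) = false := by simpa using h
        rw [this]
        simp only [List.mem_cons]
        rw [ih]
        by_cases hm : k0 ∈ K' <;> simp [hm, Ne.symm h]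

theorem contains_group (K : List (String × Int)) (v : (String × Int) → List String) (k0 : String × Int) :
    (PySem.Dict.mk (K.map (fun k => (k, v k)))).contains k0 = decide (k0 ∈ K) := by
  by_cases hm : k0 ∈ K
  · simp only [PySem.Dict.contains, List.any_map, hm, decide_true]
    exact List.any_eq_true.mpr ⟨k0, hm, by simp⟩
  · simp only [PySem.Dict.contains, List.any_map, hm, decide_false]
    apply List.any_eq_false.mpr
    intro k hk
    simp only [Function.comp, beq_iff_eq]
    intro he
    exact hm (he ▸ hk)

theorem groups_items (files : List String) :
    (bGroups files).items
      = (PySem.Set.ofList (files.map bKey)).map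
          (fun k => (k, files.filter (fun g => decide (bKey g = k)))) := by
  induction files using List.reverseRecOn with
  | nil => rfl
  | append_singleton xs f ih =>
      have hstep : bGroups (xs ++ [f])
          = (fun d g =>
              if d.contains (bKey g) then d.insert (bKey g) (d.getD (bKey g) [] ++ [g])
              else d.insert (bKey g) [g]) (bGroups xs) f := by
        simp [bGroups, List.foldl_append]
      have hd : bGroups xs = PySem.Dict.mk
          ((PySem.Set.ofList (xs.map bKey)).map
            (fun k => (k, xs.filter (fun g => decide (bKey g = k))))) :=
        PySem.Dict.ext ih
      rw [hstep, hd]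
      rw [List.map_append, List.map_singleton, ofList_append_single]
      simp only [contains_group]
      by_cases hm : bKey f ∈ PySem.Set.ofList (xs.map bKey)
      · rw [if_pos hm, if_pos (decide_eq_true hm)]
        have hget : (PySem.Dict.mk ((PySem.Set.ofList (xs.map bKey)).map
              (fun k => (k, xs.filter (fun g => decide (bKey g = k)))))).getD (bKey f) []
            = xs.filter (fun g => decide (bKey g = bKey f)) := by
          simp only [PySem.Dict.getD, PySem.Dict.get?, find_group, hm, if_pos]
          rfl
        rw [hget]
        simp only [PySem.Dict.insert, contains_group]
        rw [if_pos (decide_eq_true hm)]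
        simp only [List.map_map]
        apply List.map_congr_left
        intro k hk
        by_cases he : k = bKey f
        · subst he
          have hb : ((bKey f, xs.filter (fun g => decide (bKey g = bKey f))).1 == bKey f) = true := by
            simp
          simp only [Function.comp, hb, if_pos]
          rw [filter_append_key xs f (bKey f) rfl]
        · have hb : ((k, xs.filter (fun g => decide (bKey g = k))).1 == bKey f) = false := by
            simpa using he
          simp only [Function.comp, hb, Bool.false_eq_true, if_false]
          rw [filter_append_notkey xs f k (fun h' => he h'.symm)]
      · rw [if_neg hm, if_neg (by simpa using hm)]
        simp only [PySem.Dict.insert, contains_group]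
        rw [if_neg (by simpa using hm)]
        show (PySem.Set.ofList (xs.map bKey)).map
              (fun k => (k, xs.filter (fun g => decide (bKey g = k)))) ++ [(bKey f, [f])]
            = (PySem.Set.ofList (xs.map bKey) ++ [bKey f]).map
              (fun k => (k, (xs ++ [f]).filter (fun g => decide (bKey g = k))))
        rw [List.map_append, List.map_singleton]
        congr 1
        · apply List.map_congr_left
          intro k hk
          have hne : bKey f ≠ k := fun he => hm (he ▸ hk)
          rw [filter_append_notkey xs f k hne]
        · have hnil : xs.filter (fun g => decide (bKey g = bKey f)) = [] := by
            apply List.filter_eq_nil_iff.mpr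
            intro x hx
            simp only [decide_eq_true_eq]
            intro he
            exact hm ((PySem.Set.mem_ofList _ _).mpr (List.mem_map.mpr ⟨x, hx, he⟩))
          rw [filter_append_key xs f (bKey f) rfl, hnil]
          simp

-- ---- B's output is the grouped form ----

theorem alt_eq_cat (files : List String) :
    solution_alt files
      = cat (PySem.List.sorted2 (PySem.Set.ofList (files.map bKey)) Prod.fst Prod.snd) files := by
  have hd : bGroups files = PySem.Dict.mk
      ((PySem.Set.ofList (files.map bKey)).map
        (fun k => (k, files.filter (fun g => decide (bKey g = k))))) :=
    PySem.Dict.ext (groups_items files)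
  show (PySem.List.sorted2 (bGroups files).keys Prod.fst Prod.snd).foldl
      (fun acc k => acc ++ (bGroups files).getD k []) [] = _
  rw [hd]
  have hkeys : (PySem.Dict.mk ((PySem.Set.ofList (files.map bKey)).map
        (fun k => (k, files.filter (fun g => decide (bKey g = k)))))).keys
      = PySem.Set.ofList (files.map bKey) := by
    simp only [PySem.Dict.keys, List.map_map]
    exact (List.map_congr_left (fun a _ => rfl)).trans (List.map_id _)
  rw [hkeys, PySem.List.foldl_append_eq_flatMap, List.nil_append]
  unfold cat
  apply List.flatMap_congr
  intro k hk
  have hkK : k ∈ PySem.Set.ofList (files.map bKey) := (mem_sortedK _ k).mp hk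
  simp only [PySem.Dict.getD, PySem.Dict.get?, find_group, hkK, if_pos]
  rfl

-- ===== VERDICT (by name: the statement is the Claim_ definition above) =====
theorem solution_spec : Claim_equal_solution := by
  intro files _ hpre
  unfold Spec_solution
  rw [solutionA_eq_sorted files hpre, sorted_eq_cat, alt_eq_cat]
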